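-- pv_equiv track=rewrite | github.com/lorihe/ASI | skillcorner-event-synchronization/event_synchronization/events/players_mapping_manager.py | jno_set_mapping
-- ===== SOURCE A (Python) =====
-- def jno_set_mapping(skc_team_id_to_jno_list, provider_team_id_to_jno_list):
--     """Manage the mapping of the jersey number list of the two teams.
--     Compare the jersey number list of two teams,
--      and return the mapping if the jersey number list of the two teams are the same.
--
--     Args:
--         skc_team_id_to_jno_list (dict): The dictionary of the jersey number list of the SKC team.
--         provider_team_id_to_jno_list (dict): The dictionary of the jersey number list of the provider team.
--
--     Returns:
--         dict: Dict of mapping from SKC team ID to provider team ID if the jno list of the two teams are the same.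
--             Otherwise, None.
--     """
--
--     skc_team_id_list = list(skc_team_id_to_jno_list.keys())
--     if set(skc_team_id_to_jno_list[skc_team_id_list[0]]) == set(skc_team_id_to_jno_list[skc_team_id_list[1]]):
--         return None
--
--     provider_team_id_list = list(provider_team_id_to_jno_list.keys())
--     if set(provider_team_id_to_jno_list[provider_team_id_list[0]]) == set(
--         provider_team_id_to_jno_list[provider_team_id_list[1]]
--     ):
--         return None
--
--     skc_team_id_to_provider_team_id = {}
--     for skc_team_id, skc_jno_list in skc_team_id_to_jno_list.items():
--         for provider_team_id, provider_jno_list in provider_team_id_to_jno_list.items():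
--             if set(skc_jno_list) == set(provider_jno_list):
--                 skc_team_id_to_provider_team_id[skc_team_id] = provider_team_id
--
--     return None if len(skc_team_id_to_provider_team_id) != 2 else skc_team_id_to_provider_team_id
-- ===== SOURCE B (Python) =====
-- def jno_set_mapping(skc_team_id_to_jno_list, provider_team_id_to_jno_list):
--     skc_canon = [(tid, frozenset(jnos)) for tid, jnos in skc_team_id_to_jno_list.items()]
--     prov_canon = [(tid, frozenset(jnos)) for tid, jnos in provider_team_id_to_jno_list.items()]
--     if skc_canon[0][1] == skc_canon[1][1] or prov_canon[0][1] == prov_canon[1][1]: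
--         return None
--     index = {jset: pid for pid, jset in prov_canon}
--     mapping = {tid: index[jset] for tid, jset in skc_canon if jset in index}
--     return mapping if len(mapping) == 2 else None
-- ===== Notes on version B (the rewrite author's own statement) =====
-- stated objective: faster
-- what changed: Instead of A's nested scan comparing jersey-number sets pairwise, B canonicalizes every team's list to a frozenset once, builds a frozenset-keyed dict index of the provider teams in one pass, and resolves each SKC team by a single hash lookup, assembling the mapping as a comprehension.
import Mathlib
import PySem

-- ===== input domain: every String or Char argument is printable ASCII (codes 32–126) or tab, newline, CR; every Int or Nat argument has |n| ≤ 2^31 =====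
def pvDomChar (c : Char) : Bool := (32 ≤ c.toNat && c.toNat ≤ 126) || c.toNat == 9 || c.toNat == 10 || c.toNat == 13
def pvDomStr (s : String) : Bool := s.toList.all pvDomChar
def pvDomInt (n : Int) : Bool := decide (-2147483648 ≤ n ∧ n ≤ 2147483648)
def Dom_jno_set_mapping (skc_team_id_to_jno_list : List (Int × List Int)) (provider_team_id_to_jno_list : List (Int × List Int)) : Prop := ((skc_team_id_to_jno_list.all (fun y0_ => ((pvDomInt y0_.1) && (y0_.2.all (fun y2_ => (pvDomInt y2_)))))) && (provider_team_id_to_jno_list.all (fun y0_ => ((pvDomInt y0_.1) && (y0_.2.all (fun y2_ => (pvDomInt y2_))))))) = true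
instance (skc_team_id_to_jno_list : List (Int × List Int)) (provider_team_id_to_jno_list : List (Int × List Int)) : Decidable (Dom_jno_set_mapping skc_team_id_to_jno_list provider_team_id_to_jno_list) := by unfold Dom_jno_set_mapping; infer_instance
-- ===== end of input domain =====

-- B replaces A's nested scan (for every SKC team, rescan all provider teams comparing jersey sets)
-- by: canonicalize every team's jersey list to a frozenset once, build a frozenset-keyed index of
-- the provider teams in one pass, then resolve each SKC team by a single lookup; objective: faster.

-- ===== PORT A =====
def jnoMapA (d1 d2 : PySem.Dict Int (List Int)) : PySem.Dict Int Int :=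
  d1.items.foldl (fun m sp =>
    d2.items.foldl (fun m pp =>
      if PySem.Set.equal (PySem.Set.ofList sp.2) (PySem.Set.ofList pp.2) then m.insert sp.1 pp.1 else m) m)
    PySem.Dict.empty
def jno_set_mapping (skc_team_id_to_jno_list : List (Int × List Int)) (provider_team_id_to_jno_list : List (Int × List Int)) : Option (List (Int × Int)) :=
  let d1 := PySem.Dict.ofList skc_team_id_to_jno_list
  let skc_ids := d1.keys
  if skc_ids.length < 2 then none  -- Python raises IndexError here (fewer than 2 SKC keys); excluded by Pre_
  else if PySem.Set.equal (PySem.Set.ofList (d1.getD (skc_ids.getD 0 0) [])) (PySem.Set.ofList (d1.getD (skc_ids.getD 1 0) [])) then none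
  else
    let d2 := PySem.Dict.ofList provider_team_id_to_jno_list
    let prov_ids := d2.keys
    if prov_ids.length < 2 then none  -- Python raises IndexError here (fewer than 2 provider keys); excluded by Pre_
    else if PySem.Set.equal (PySem.Set.ofList (d2.getD (prov_ids.getD 0 0) [])) (PySem.Set.ofList (d2.getD (prov_ids.getD 1 0) [])) then none
    else
      let m := jnoMapA d1 d2
      if m.size ≠ 2 then none else some m.items
-- ===== PORT B =====
-- B-side helper: a Python frozenset is modelled by its canonical form, the sorted list of its
-- distinct elements (exact: two frozensets of ints are equal iff their canonical forms are equal,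
-- so a dict keyed by frozensets behaves exactly like one keyed by canonical forms)
def pvCanon (xs : List Int) : List Int := PySem.List.sorted (PySem.Set.ofList xs) (fun x => x) false
-- [(tid, frozenset(jnos)) for tid, jnos in d.items()]
def pvCanonItems (d : List (Int × List Int)) : List (Int × List Int) :=
  (PySem.Dict.ofList d).items.map (fun p => (p.1, pvCanon p.2))
def jno_set_mapping_alt (skc_team_id_to_jno_list : List (Int × List Int)) (provider_team_id_to_jno_list : List (Int × List Int)) : Option (List (Int × Int)) :=
  let skc_canon := pvCanonItems skc_team_id_to_jno_list
  let prov_canon := pvCanonItems provider_team_id_to_jno_list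
  -- 'if skc_canon[0][1] == skc_canon[1][1] or prov_canon[0][1] == prov_canon[1][1]' with Python's
  -- short-circuit 'or'; a failing [0]/[1] access is Python's IndexError, excluded by Pre_
  match skc_canon with
  | s0 :: s1 :: _ =>
    if s0.2 = s1.2 then none
    else
      match prov_canon with
      | p0 :: p1 :: _ =>
        if p0.2 = p1.2 then none
        else
          let index := PySem.Dict.ofList (prov_canon.map (fun p => (p.2, p.1)))
          let mapping := PySem.Dict.ofList (skc_canon.filterMap (fun sp => (index.get? sp.2).map (fun pid => (sp.1, pid))))
          if mapping.size = 2 then some mapping.items else none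
      | _ => none  -- Python raises IndexError here; excluded by Pre_
  | _ => none  -- Python raises IndexError here; excluded by Pre_
-- ===== PRECONDITION & SPEC =====
-- Pre_ is exactly where Python A returns without raising: at least two SKC keys, and either the
-- first guard fires (the first two SKC jersey sets are equal, so the provider dict is never
-- indexed) or there are also at least two provider keys; otherwise A raises IndexError.
def Pre_jno_set_mapping (skc_team_id_to_jno_list : List (Int × List Int)) (provider_team_id_to_jno_list : List (Int × List Int)) : Prop :=
  let d1 := PySem.Dict.ofList skc_team_id_to_jno_list
  2 ≤ d1.keys.length ∧
    (PySem.Set.equal (PySem.Set.ofList (d1.getD (d1.keys.getD 0 0) [])) (PySem.Set.ofList (d1.getD (d1.keys.getD 1 0) [])) = true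
      ∨ 2 ≤ (PySem.Dict.ofList provider_team_id_to_jno_list).keys.length)

instance (skc_team_id_to_jno_list : List (Int × List Int)) (provider_team_id_to_jno_list : List (Int × List Int)) : Decidable (Pre_jno_set_mapping skc_team_id_to_jno_list provider_team_id_to_jno_list) := by unfold Pre_jno_set_mapping; infer_instance

def pvWitness_jno_set_mapping : (List (Int × List Int)) × (List (Int × List Int)) :=
  ([(1, [7, 9]), (2, [3])], [(10, [9, 7]), (20, [3])])

def Spec_jno_set_mapping (skc_team_id_to_jno_list : List (Int × List Int)) (provider_team_id_to_jno_list : List (Int × List Int)) (out : Option (List (Int × Int))) : Prop := out = jno_set_mapping_alt skc_team_id_to_jno_list provider_team_id_to_jno_list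
instance (skc_team_id_to_jno_list : List (Int × List Int)) (provider_team_id_to_jno_list : List (Int × List Int)) (out : Option (List (Int × Int))) : Decidable (Spec_jno_set_mapping skc_team_id_to_jno_list provider_team_id_to_jno_list out) := by unfold Spec_jno_set_mapping; infer_instance

-- ===== CLAIM (what is proved, stated in full; the proofs are below) =====
def Claim_equal_jno_set_mapping : Prop := ∀ (skc_team_id_to_jno_list : List (Int × List Int)) (provider_team_id_to_jno_list : List (Int × List Int)), Dom_jno_set_mapping skc_team_id_to_jno_list provider_team_id_to_jno_list → Pre_jno_set_mapping skc_team_id_to_jno_list provider_team_id_to_jno_list → Spec_jno_set_mapping skc_team_id_to_jno_list provider_team_id_to_jno_list (jno_set_mapping skc_team_id_to_jno_list provider_team_id_to_jno_list)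

-- ===== LEMMAS AND PROOFS =====

-- two Python frozensets are equal iff their canonical forms are equal
theorem canon_eq (a b : List Int) :
    PySem.Set.equal (PySem.Set.ofList a) (PySem.Set.ofList b) = true ↔ pvCanon a = pvCanon b := by
  constructor
  · intro h
    have hmem : ∀ x : Int, x ∈ PySem.Set.ofList a ↔ x ∈ PySem.Set.ofList b :=
      (PySem.Set.equal_iff _ _).mp h
    have hperm : (pvCanon b).Perm (PySem.Set.ofList a) := by
      refine (PySem.List.sorted_perm _ _ _).trans ?_
      exact ((List.perm_ext_iff_of_nodup (PySem.Set.nodup_ofList b) (PySem.Set.nodup_ofList a)).mpr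
        (fun x => (hmem x).symm)).symm.symm
    have hnd : (pvCanon b).Nodup :=
      ((PySem.List.sorted_perm _ _ _).nodup_iff).mpr (PySem.Set.nodup_ofList b)
    have hlt : (pvCanon b).Pairwise (fun x y : Int => x < y) := by
      have hle := PySem.List.sorted_pairwise (xs := PySem.Set.ofList b) (key := fun x : Int => x)
      exact (hle.and hnd).imp (fun hp => lt_of_le_of_ne hp.1 hp.2)
    exact PySem.List.sorted_eq_of_perm_of_pairwise_lt _ _ _ hperm hlt
  · intro h
    refine (PySem.Set.equal_iff _ _).mpr (fun x => ?_)
    have ha : x ∈ PySem.Set.ofList a ↔ x ∈ pvCanon a := (PySem.List.mem_sorted _ _ _ _).symm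
    have hb : x ∈ PySem.Set.ofList b ↔ x ∈ pvCanon b := (PySem.List.mem_sorted _ _ _ _).symm
    rw [ha, hb, h]

-- last provider item whose jno set has canonical form s
def bestMatch (s : List Int) : List (Int × List Int) → Option Int
  | [] => none
  | p :: rest =>
    match bestMatch s rest with
    | some q => some q
    | none => if pvCanon p.2 = s then some p.1 else none

theorem index_get (items : List (Int × List Int)) (ix : PySem.Dict (List Int) Int) (s : List Int) :
    (items.foldl (fun ix pp => ix.insert (pvCanon pp.2) pp.1) ix).get? s =
      (match bestMatch s items with
       | some q => some q
       | none => ix.get? s) := by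
  induction items generalizing ix with
  | nil => simp [bestMatch]
  | cons p rest ih =>
    simp only [List.foldl_cons, ih, bestMatch]
    cases bestMatch s rest with
    | some q => rfl
    | none =>
      rw [PySem.Dict.get?_insert]
      by_cases h : pvCanon p.2 = s
      · simp [h]
      · have h' : ¬ s = pvCanon p.2 := fun e => h e.symm
        simp [h, h']

theorem inner_loop (items : List (Int × List Int)) (m : PySem.Dict Int Int) (sk : Int) (s : List Int) :
    (items.foldl (fun m pp =>
        if PySem.Set.equal (PySem.Set.ofList s) (PySem.Set.ofList pp.2) then m.insert sk pp.1 else m) m) =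
      (match bestMatch (pvCanon s) items with
       | some q => m.insert sk q
       | none => m) := by
  induction items generalizing m with
  | nil => simp [bestMatch]
  | cons p rest ih =>
    simp only [List.foldl_cons, ih, bestMatch]
    cases hb : bestMatch (pvCanon s) rest with
    | some q =>
      by_cases h : PySem.Set.equal (PySem.Set.ofList s) (PySem.Set.ofList p.2) = true
      · simp [h, PySem.Dict.insert_insert_self]
      · simp [h]
    | none =>
      by_cases h : PySem.Set.equal (PySem.Set.ofList s) (PySem.Set.ofList p.2) = true
      · have hc : pvCanon p.2 = pvCanon s := ((canon_eq s p.2).mp h).symm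
        simp [h, hc]
      · have hc : ¬ pvCanon p.2 = pvCanon s := fun e => h ((canon_eq s p.2).mpr e.symm)
        simp [h, hc]

theorem foldl_filterMap_insert (g : Int × List Int → Option Int) (l : List (Int × List Int)) (m : PySem.Dict Int Int) :
    l.foldl (fun m sp =>
        match g sp with
        | some q => m.insert sp.1 q
        | none => m) m =
      (l.filterMap (fun sp => (g sp).map (fun pid => (sp.1, pid)))).foldl (fun d p => d.insert p.1 p.2) m := by
  induction l generalizing m with
  | nil => rfl
  | cons sp rest ih => cases hg : g sp <;> simp [hg, ih]

theorem map_eq (d1 d2 : PySem.Dict Int (List Int)) :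
    jnoMapA d1 d2 =
      PySem.Dict.ofList ((d1.items.map (fun p => (p.1, pvCanon p.2))).filterMap
        (fun sp => ((PySem.Dict.ofList ((d2.items.map (fun p => (p.1, pvCanon p.2))).map (fun p => (p.2, p.1)))).get? sp.2).map (fun pid => (sp.1, pid)))) := by
  unfold jnoMapA
  have hofA : ∀ (l : List (List Int × Int)), PySem.Dict.ofList l = l.foldl (fun d p => d.insert p.1 p.2) PySem.Dict.empty := fun _ => rfl
  have hofB : ∀ (l : List (Int × Int)), PySem.Dict.ofList l = l.foldl (fun d p => d.insert p.1 p.2) PySem.Dict.empty := fun _ => rfl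
  have hix : PySem.Dict.ofList ((d2.items.map (fun p => (p.1, pvCanon p.2))).map (fun p => (p.2, p.1))) =
      d2.items.foldl (fun ix pp => ix.insert (pvCanon pp.2) pp.1) PySem.Dict.empty := by
    rw [hofA]; simp [List.foldl_map]
  rw [hix, List.filterMap_map, hofB]
  simp only [Function.comp_def]
  rw [← foldl_filterMap_insert (fun sp => (d2.items.foldl (fun ix pp => ix.insert (pvCanon pp.2) pp.1) PySem.Dict.empty).get? (pvCanon sp.2))]
  refine PySem.List.foldl_congr_mem _ _ _ _ (fun m sp _ => ?_)
  rw [inner_loop, index_get]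
  cases bestMatch (pvCanon sp.2) d2.items <;> simp

theorem getD_idx (d : PySem.Dict Int (List Int)) (h : d.keys.Nodup) (i : Nat) (hi : i < d.items.length) :
    d.getD (d.items[i].1) [] = d.items[i].2 :=
  PySem.Dict.getD_of_mem_items (d := d) (by simp) h []

-- ===== VERDICT (by name: the statement is the Claim_ definition above) =====
theorem jno_set_mapping_spec : Claim_equal_jno_set_mapping := by
  intro skc prov _ hpre
  unfold Spec_jno_set_mapping
  obtain ⟨h1, h2⟩ := hpre
  unfold jno_set_mapping jno_set_mapping_alt pvCanonItems
  set d1 := PySem.Dict.ofList skc with hd1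
  set d2 := PySem.Dict.ofList prov with hd2
  have hnd1 : d1.keys.Nodup := PySem.Dict.nodup_keys_ofList skc
  have hnd2 : d2.keys.Nodup := PySem.Dict.nodup_keys_ofList prov
  have hk1 : d1.keys = d1.items.map (fun p => p.1) := rfl
  have hk2 : d2.keys = d2.items.map (fun p => p.1) := rfl
  have hlen1 : 2 ≤ d1.items.length := by rw [hk1, List.length_map] at h1; exact h1
  obtain ⟨i0, i1, r1, hi1⟩ : ∃ a b t, d1.items = a :: b :: t := by
    rcases hl : d1.items with _ | ⟨a, _ | ⟨b, t⟩⟩ <;> rw [hl] at hlen1 <;> simp at hlen1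
    exact ⟨a, b, t, rfl⟩
  have hg0 : d1.getD i0.1 [] = i0.2 := by
    have := getD_idx d1 hnd1 0 (by rw [hi1]; simp)
    simp only [hi1] at this; simpa using this
  have hg1 : d1.getD i1.1 [] = i1.2 := by
    have := getD_idx d1 hnd1 1 (by rw [hi1]; simp)
    simp only [hi1] at this; simpa using this
  simp only [hk1, hk2, hi1, List.map_cons, List.length_cons, List.getD_cons_zero,
    List.getD_cons_succ, hg0, hg1] at h2 ⊢
  rw [if_neg (by omega)]
  by_cases hc1 : pvCanon i0.2 = pvCanon i1.2
  · rw [if_pos ((canon_eq _ _).mpr hc1), if_pos hc1]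
  · rw [if_neg (fun h => hc1 ((canon_eq _ _).mp h)), if_neg hc1]
    have hlen2 : 2 ≤ d2.items.length := by
      rcases h2 with h2 | h2
      · exact absurd ((canon_eq _ _).mp h2) hc1
      · rwa [List.length_map] at h2
    obtain ⟨j0, j1, r2, hi2⟩ : ∃ a b t, d2.items = a :: b :: t := by
      rcases hl : d2.items with _ | ⟨a, _ | ⟨b, t⟩⟩ <;> rw [hl] at hlen2 <;> simp at hlen2
      exact ⟨a, b, t, rfl⟩
    have hg0' : d2.getD j0.1 [] = j0.2 := by
      have := getD_idx d2 hnd2 0 (by rw [hi2]; simp)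
      simp only [hi2] at this; simpa using this
    have hg1' : d2.getD j1.1 [] = j1.2 := by
      have := getD_idx d2 hnd2 1 (by rw [hi2]; simp)
      simp only [hi2] at this; simpa using this
    have hm := map_eq d1 d2
    simp only [hi2, List.map_cons, List.length_cons, List.getD_cons_zero, List.getD_cons_succ,
      hg0', hg1'] at hm ⊢
    rw [if_neg (by omega)]
    by_cases hc2 : pvCanon j0.2 = pvCanon j1.2
    · rw [if_pos ((canon_eq _ _).mpr hc2), if_pos hc2]
    · rw [if_neg (fun h => hc2 ((canon_eq _ _).mp h)), if_neg hc2]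
      simp only [hi1, List.map_cons] at hm
      rw [← hm]
      by_cases hsz : (jnoMapA d1 d2).size = 2
      · simp [hsz]
      · simp [hsz]
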